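-- pv_equiv track=rewrite | github.com/abhiramvenugopal/vscode | Spoj_test/both-x.py | bothCountX
-- ===== SOURCE A (Python) =====
-- def bothCountX(string1, string2, x):
--     string1=string1.lower()
--     string2=string2.lower()
--     dictStr1={}
--     dictStr2={}
--     res=[]
--     for i in string1:
--         dictStr1[i]=dictStr1.get(i,0)+1
--     for i in string2:
--         dictStr2[i]=dictStr2.get(i,0)+1
--     for i in dictStr1.keys():
--         if (i in dictStr2) and (dictStr1[i]==x) and (dictStr2[i]==x):
--             res.append(i)
--     res.sort()
--     return res
-- ===== SOURCE B (Python) =====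
-- def _runs(t):
--     # t is sorted; return its runs as (char, run length) pairs, keys strictly increasing
--     if not t:
--         return []
--     c = t[0]
--     j = 1
--     while j < len(t) and t[j] == c:
--         j += 1
--     return [(c, j)] + _runs(t[j:])
--
--
-- def _merge(r1, r2, x):
--     # two-pointer merge of two key-sorted run lists, keeping keys whose both runs have length x
--     if not r1 or not r2:
--         return []
--     (c1, n1), (c2, n2) = r1[0], r2[0]
--     if c1 < c2:
--         return _merge(r1[1:], r2, x)
--     if c2 < c1:
--         return _merge(r1, r2[1:], x)
--     return ([c1] if n1 == x and n2 == x else []) + _merge(r1[1:], r2[1:], x)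
--
--
-- def bothCountX(string1, string2, x):
--     r1 = _runs(sorted(string1.lower()))
--     r2 = _runs(sorted(string2.lower()))
--     return _merge(r1, r2, x)
-- ===== Notes on version B (the rewrite author's own statement) =====
-- stated objective: alternative
-- what changed: Replaces A's two frequency dictionaries and key-pass with sort-then-run-length-encode of each string followed by a two-pointer merge of the two key-sorted run lists; the result comes out already sorted, so no dictionary and no final sort exist.
import Mathlib
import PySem

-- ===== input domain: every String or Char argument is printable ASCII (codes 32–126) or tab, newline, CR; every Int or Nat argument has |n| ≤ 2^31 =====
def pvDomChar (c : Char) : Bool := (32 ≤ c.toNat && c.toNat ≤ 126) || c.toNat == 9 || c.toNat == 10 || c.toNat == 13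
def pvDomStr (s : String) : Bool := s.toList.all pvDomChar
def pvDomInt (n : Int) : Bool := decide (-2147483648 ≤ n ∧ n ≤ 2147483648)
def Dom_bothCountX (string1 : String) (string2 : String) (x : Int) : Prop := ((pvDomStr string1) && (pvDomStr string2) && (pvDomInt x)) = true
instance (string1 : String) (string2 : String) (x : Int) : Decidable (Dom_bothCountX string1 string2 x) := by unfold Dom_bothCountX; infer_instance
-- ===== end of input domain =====

-- B replaces A's two frequency dictionaries and final sort with sort + run-length encoding of
-- each string and a two-pointer merge of the key-sorted run lists (objective: alternative).

-- ===== PORT A =====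
def bothCountX (string1 : String) (string2 : String) (x : Int) : List String :=
  let t1 := (PySem.Str.lower string1).toList
  let t2 := (PySem.Str.lower string2).toList
  let d1 := t1.foldl (fun d c => d.insert c (d.getD c 0 + 1)) (PySem.Dict.empty : PySem.Dict Char Int)
  let d2 := t2.foldl (fun d c => d.insert c (d.getD c 0 + 1)) (PySem.Dict.empty : PySem.Dict Char Int)
  let res := d1.keys.foldl (fun res c =>
    if d2.contains c && (d1.getD c 0 == x) && (d2.getD c 0 == x) then res ++ [c] else res) []
  (PySem.List.sorted res (fun c => c) false).map (fun c => String.ofList [c])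

-- ===== PORT B =====
-- run-length encoding of a sorted char list (Source B's _runs): the inner while loop counting the
-- equal prefix is takeWhile/dropWhile, the recursion is Python's recursion on t[j:]
def pvRuns : List Char → List (Char × Int)
  | [] => []
  | c :: rest =>
    (c, 1 + ((rest.takeWhile (· == c)).length : Int)) :: pvRuns (rest.dropWhile (· == c))
termination_by l => l.length
decreasing_by
  simp only [List.length_cons]
  exact Nat.lt_succ_of_le (List.length_dropWhile_le _ _)

-- two-pointer merge (Source B's _merge): keep keys whose run length is x in both lists
def pvMerge (x : Int) : List (Char × Int) → List (Char × Int) → List Char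
  | [], _ => []
  | _ :: _, [] => []
  | (c1, n1) :: r1, (c2, n2) :: r2 =>
    if c1 < c2 then pvMerge x r1 ((c2, n2) :: r2)
    else if c2 < c1 then pvMerge x ((c1, n1) :: r1) r2
    else (if n1 == x && n2 == x then [c1] else []) ++ pvMerge x r1 r2
termination_by r1 r2 => r1.length + r2.length
decreasing_by all_goals (simp only [List.length_cons]; omega)

def bothCountX_alt (string1 : String) (string2 : String) (x : Int) : List String :=
  let r1 := pvRuns (PySem.List.sorted (PySem.Str.lower string1).toList (fun c => c) false)
  let r2 := pvRuns (PySem.List.sorted (PySem.Str.lower string2).toList (fun c => c) false)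
  (pvMerge x r1 r2).map (fun c => String.ofList [c])

-- ===== PRECONDITION & SPEC =====
def Spec_bothCountX (string1 : String) (string2 : String) (x : Int) (out : List String) : Prop := out = bothCountX_alt string1 string2 x
instance (string1 : String) (string2 : String) (x : Int) (out : List String) : Decidable (Spec_bothCountX string1 string2 x out) := by unfold Spec_bothCountX; infer_instance

-- ===== CLAIM =====
def Claim_equal_bothCountX : Prop := ∀ (string1 : String) (string2 : String) (x : Int), Dom_bothCountX string1 string2 x → Spec_bothCountX string1 string2 x (bothCountX string1 string2 x)

-- ===== LEMMAS AND PROOFS =====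

theorem pv_lt_of_mem_dropWhile {c : Char} {l : List Char}
    (h : (c :: l).Pairwise (· ≤ ·)) : ∀ e ∈ l.dropWhile (· == c), c < e := by
  induction l with
  | nil => simp
  | cons a l' ih =>
    rw [List.dropWhile_cons]
    by_cases hac : (a == c) = true
    · simp only [hac, if_true]
      have hca : a = c := by simpa [beq_iff_eq] using hac
      apply ih
      subst hca
      exact (List.pairwise_cons.mpr ⟨fun e he => (List.pairwise_cons.mp h).1 e (List.mem_cons_of_mem _ he), ((List.pairwise_cons.mp h).2).tail⟩)
    · simp only [hac]
      intro e he
      have hne : a ≠ c := by simpa [beq_iff_eq] using hac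
      have hca : c ≤ a := (List.pairwise_cons.mp h).1 a (List.mem_cons_self)
      have hlt : c < a := lt_of_le_of_ne hca (Ne.symm hne)
      rcases List.mem_cons.mp he with rfl | he'
      · exact hlt
      · have hae : a ≤ e := (List.pairwise_cons.mp ((List.pairwise_cons.mp h).2)).1 e he'
        exact lt_of_lt_of_le hlt hae

theorem pv_runs_spec : ∀ (s : List Char), s.Pairwise (· ≤ ·) →
    ((pvRuns s).map Prod.fst).Pairwise (· < ·)
    ∧ (∀ c, c ∈ (pvRuns s).map Prod.fst ↔ c ∈ s)
    ∧ (∀ p ∈ pvRuns s, p.2 = (s.count p.1 : Int)) := by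
  intro s
  induction s using pvRuns.induct with
  | case1 => intro _; simp [pvRuns]
  | case2 c rest ih =>
    intro hs
    have hdw_sub := List.dropWhile_sublist (l := rest) (· == c)
    have hdw_pair : (rest.dropWhile (· == c)).Pairwise (· ≤ ·) :=
      List.Pairwise.sublist hdw_sub hs.tail
    have hlt : ∀ e ∈ rest.dropWhile (· == c), c < e := pv_lt_of_mem_dropWhile hs
    obtain ⟨ih1, ih2, ih3⟩ := ih hdw_pair
    have htw : ∀ e ∈ rest.takeWhile (· == c), e = c := fun e he =>
      beq_iff_eq.mp (List.mem_takeWhile_imp (p := (· == c)) he)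
    have hsplit : rest.takeWhile (· == c) ++ rest.dropWhile (· == c) = rest :=
      List.takeWhile_append_dropWhile
    have hcnd : (rest.dropWhile (· == c)).count c = 0 :=
      List.count_eq_zero.mpr (fun hmem => lt_irrefl c (hlt c hmem))
    have hcnt : (rest.takeWhile (· == c)).count c = (rest.takeWhile (· == c)).length := by
      rw [List.count_eq_length]; intro a ha; exact (htw a ha).symm
    rw [pvRuns]
    refine ⟨?_, ?_, ?_⟩
    · simp only [List.map_cons, List.pairwise_cons]
      exact ⟨fun k hk => hlt k ((ih2 k).mp hk), ih1⟩
    · intro c'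
      simp only [List.map_cons, List.mem_cons, ih2]
      constructor
      · rintro (rfl | h)
        · exact Or.inl rfl
        · exact Or.inr (hdw_sub.mem h)
      · rintro (rfl | h)
        · exact Or.inl rfl
        · rw [← hsplit] at h
          rcases List.mem_append.mp h with h' | h'
          · exact Or.inl (htw c' h')
          · exact Or.inr h'
    · intro p hp
      rcases List.mem_cons.mp hp with rfl | hp'
      · have h1 : rest.count c = (rest.takeWhile (· == c)).length := by
          conv_lhs => rw [← hsplit]
          rw [List.count_append, hcnt, hcnd]
          omega
        simp only [List.count_cons_self, h1]
        push_cast; ring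
      · have hkey : p.1 ∈ rest.dropWhile (· == c) := by
          have := List.mem_map_of_mem (f := Prod.fst) hp'
          exact (ih2 p.1).mp this
        have hne : p.1 ≠ c := fun h => lt_irrefl c (h ▸ hlt p.1 hkey)
        have h0 : (rest.takeWhile (· == c)).count p.1 = 0 :=
          List.count_eq_zero.mpr (fun hmem => hne (htw _ hmem))
        have h1 : (c :: rest).count p.1 = (rest.dropWhile (· == c)).count p.1 := by
          rw [List.count_cons_of_ne hne.symm]
          conv_lhs => rw [← hsplit]
          rw [List.count_append, h0]
          omega
        rw [ih3 p hp', h1]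

theorem pv_merge_sublist (x : Int) : ∀ (r1 r2 : List (Char × Int)),
    (pvMerge x r1 r2).Sublist (r1.map Prod.fst) := by
  intro r1 r2
  induction r1, r2 using pvMerge.induct with
  | case1 r2 => simp [pvMerge]
  | case2 p r1 => simp [pvMerge]
  | case3 c1 n1 r1 c2 n2 r2 h ih =>
    rw [pvMerge, if_pos h]
    exact ih.cons c1
  | case4 c1 n1 r1 c2 n2 r2 h h' ih =>
    rw [pvMerge, if_neg h, if_pos h']
    exact ih
  | case5 c1 n1 r1 c2 n2 r2 h h' ih =>
    rw [pvMerge, if_neg h, if_neg h']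
    by_cases hx : (n1 == x && n2 == x) = true
    · simp only [hx, if_true, List.map_cons]
      exact (List.Sublist.cons₂ c1 ih)
    · simp only [hx]
      simp only [List.map_cons]
      exact ih.cons c1

theorem pv_pairwise_head {c : Char} {n : Int} {r : List (Char × Int)}
    (h : (((c, n) :: r).map Prod.fst).Pairwise (· < ·)) :
    (∀ k ∈ r.map Prod.fst, c < k) ∧ ((r.map Prod.fst).Pairwise (· < ·)) := by
  rw [List.map_cons, List.pairwise_cons] at h
  exact h

theorem pv_merge_mem (x : Int) : ∀ (r1 r2 : List (Char × Int)),
    ((r1.map Prod.fst).Pairwise (· < ·)) → ((r2.map Prod.fst).Pairwise (· < ·)) →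
    ∀ c, c ∈ pvMerge x r1 r2 ↔ (c, x) ∈ r1 ∧ (c, x) ∈ r2 := by
  intro r1 r2
  induction r1, r2 using pvMerge.induct with
  | case1 r2 => simp [pvMerge]
  | case2 p r1 => simp [pvMerge]
  | case3 c1 n1 r1 c2 n2 r2 h ih =>
    intro h1 h2 c
    obtain ⟨hh1, ht1⟩ := pv_pairwise_head h1
    obtain ⟨hh2, ht2⟩ := pv_pairwise_head h2
    rw [pvMerge, if_pos h, ih ht1 h2 c]
    constructor
    · rintro ⟨ha, hb⟩; exact ⟨List.mem_cons_of_mem _ ha, hb⟩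
    · rintro ⟨ha, hb⟩
      rcases List.mem_cons.mp ha with heq | ha'
      · exfalso
        have hc : c = c1 := congrArg Prod.fst heq
        subst hc
        rcases List.mem_cons.mp hb with heq2 | hb'
        · have : c = c2 := congrArg Prod.fst heq2
          exact absurd (this ▸ h) (lt_irrefl _)
        · have := hh2 c (List.mem_map_of_mem hb')
          exact absurd (lt_trans h this) (lt_irrefl _)
      · exact ⟨ha', hb⟩
  | case4 c1 n1 r1 c2 n2 r2 h h' ih =>
    intro h1 h2 c
    obtain ⟨hh1, ht1⟩ := pv_pairwise_head h1
    obtain ⟨hh2, ht2⟩ := pv_pairwise_head h2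
    rw [pvMerge, if_neg h, if_pos h', ih h1 ht2 c]
    constructor
    · rintro ⟨ha, hb⟩; exact ⟨ha, List.mem_cons_of_mem _ hb⟩
    · rintro ⟨ha, hb⟩
      rcases List.mem_cons.mp hb with heq | hb'
      · exfalso
        have hc : c = c2 := congrArg Prod.fst heq
        subst hc
        rcases List.mem_cons.mp ha with heq2 | ha'
        · have : c = c1 := congrArg Prod.fst heq2
          exact absurd (this ▸ h') (lt_irrefl _)
        · have := hh1 c (List.mem_map_of_mem ha')
          exact absurd (lt_trans h' this) (lt_irrefl _)
      · exact ⟨ha, hb'⟩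
  | case5 c1 n1 r1 c2 n2 r2 h h' ih =>
    intro h1 h2 c
    obtain ⟨hh1, ht1⟩ := pv_pairwise_head h1
    obtain ⟨hh2, ht2⟩ := pv_pairwise_head h2
    have hceq : c1 = c2 := le_antisymm (le_of_not_gt h') (le_of_not_gt h)
    rw [pvMerge, if_neg h, if_neg h', List.mem_append, ih ht1 ht2 c]
    constructor
    · rintro (hin | ⟨ha, hb⟩)
      · by_cases hx : (n1 == x && n2 == x) = true
        · simp only [hx, if_true, List.mem_singleton] at hin
          subst hin
          obtain ⟨e1, e2⟩ := (Bool.and_eq_true _ _).mp hx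
          have e1' : n1 = x := beq_iff_eq.mp e1
          have e2' : n2 = x := beq_iff_eq.mp e2
          exact ⟨e1' ▸ List.mem_cons_self, hceq ▸ (e2' ▸ List.mem_cons_self)⟩
        · simp [hx] at hin
      · exact ⟨List.mem_cons_of_mem _ ha, List.mem_cons_of_mem _ hb⟩
    · rintro ⟨ha, hb⟩
      rcases List.mem_cons.mp ha with heq | ha'
      · have hc : c = c1 := congrArg Prod.fst heq
        have hn1 : n1 = x := (congrArg Prod.snd heq).symm
        subst hc
        rcases List.mem_cons.mp hb with heq2 | hb'
        · have hn2 : n2 = x := (congrArg Prod.snd heq2).symm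
          left
          simp [hn1, hn2]
        · exfalso
          have := hh2 c (List.mem_map_of_mem hb')
          exact absurd (hceq ▸ this) (lt_irrefl _)
      · rcases List.mem_cons.mp hb with heq2 | hb'
        · exfalso
          have hc : c = c2 := congrArg Prod.fst heq2
          subst hc
          have := hh1 c (List.mem_map_of_mem ha')
          exact absurd (hceq ▸ this) (lt_irrefl _)
        · exact Or.inr ⟨ha', hb'⟩

theorem pv_runs_mem_iff (t : List Char) (c : Char) (x : Int) :
    (c, x) ∈ pvRuns (PySem.List.sorted t (fun a => a) false) ↔ (c ∈ t ∧ (t.count c : Int) = x) := by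
  have hpw : (PySem.List.sorted t (fun a => a) false).Pairwise (· ≤ ·) := by
    simpa using PySem.List.sorted_pairwise (xs := t) (key := fun a => a)
  obtain ⟨h1, h2, h3⟩ := pv_runs_spec _ hpw
  have hperm : (PySem.List.sorted t (fun a => a) false).Perm t := PySem.List.sorted_perm _ _ _
  constructor
  · intro hm
    have hk : c ∈ (pvRuns (PySem.List.sorted t (fun a => a) false)).map Prod.fst :=
      List.mem_map_of_mem hm
    have hmem : c ∈ t := hperm.mem_iff.mp ((h2 c).mp hk)
    have hval := h3 _ hm
    rw [hperm.count_eq] at hval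
    exact ⟨hmem, hval.symm⟩
  · rintro ⟨hmem, hcnt⟩
    have hk : c ∈ (pvRuns (PySem.List.sorted t (fun a => a) false)).map Prod.fst :=
      (h2 c).mpr (hperm.mem_iff.mpr hmem)
    obtain ⟨p, hp, hpc⟩ := List.mem_map.mp hk
    have hval := h3 p hp
    rw [hperm.count_eq, hpc, hcnt] at hval
    have : p = (c, x) := Prod.ext hpc hval
    exact this ▸ hp

theorem pv_filter_eq (t1 t2 : List Char) (x : Int) :
    (PySem.Set.ofList t1).filter
      (fun c => (PySem.Dict.counter t2).contains c
        && (((PySem.Dict.counter t1).getD c 0) == x) && (((PySem.Dict.counter t2).getD c 0) == x))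
    = (PySem.Set.ofList t1).filter (fun c => ((t1.count c : Int) == x) && ((t2.count c : Int) == x)) := by
  apply List.filter_congr
  intro c hc
  rw [PySem.Set.mem_ofList] at hc
  simp only [PySem.Dict.getD_counter, PySem.Dict.contains_counter]
  by_cases h2 : c ∈ t2
  · simp [h2]
  · have h0 : t2.count c = 0 := List.count_eq_zero.mpr h2
    have h1 : 0 < t1.count c := List.count_pos_iff.mpr hc
    have hx : ¬ (((t1.count c : Int) == x) && ((t2.count c : Int) == x)) = true := by
      rw [Bool.and_eq_true, beq_iff_eq, beq_iff_eq]
      rintro ⟨e1, e2⟩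
      omega
    simp [h2, Bool.eq_false_iff.mpr hx]

theorem pv_sorted_filter_eq_merge (t1 t2 : List Char) (x : Int) :
    PySem.List.sorted
      ((PySem.Set.ofList t1).filter (fun c => ((t1.count c : Int) == x) && ((t2.count c : Int) == x)))
      (fun c => c) false
    = pvMerge x (pvRuns (PySem.List.sorted t1 (fun c => c) false))
               (pvRuns (PySem.List.sorted t2 (fun c => c) false)) := by
  have hpw1 : (PySem.List.sorted t1 (fun a => a) false).Pairwise (· ≤ ·) := by
    simpa using PySem.List.sorted_pairwise (xs := t1) (key := fun a => a)
  have hpw2 : (PySem.List.sorted t2 (fun a => a) false).Pairwise (· ≤ ·) := by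
    simpa using PySem.List.sorted_pairwise (xs := t2) (key := fun a => a)
  obtain ⟨hk1, _, _⟩ := pv_runs_spec _ hpw1
  obtain ⟨hk2, _, _⟩ := pv_runs_spec _ hpw2
  have hpairM : (pvMerge x (pvRuns (PySem.List.sorted t1 (fun c => c) false))
                  (pvRuns (PySem.List.sorted t2 (fun c => c) false))).Pairwise (· < ·) :=
    List.Pairwise.sublist (pv_merge_sublist x _ _) hk1
  have hmemM := pv_merge_mem x _ _ hk1 hk2
  apply PySem.List.sorted_eq_of_perm_of_pairwise_lt
  · -- Perm
    apply (List.perm_ext_iff_of_nodup (hpairM.imp (fun hlt => ne_of_lt hlt)) ((PySem.Set.nodup_ofList t1).filter _)).mpr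
    intro c
    rw [hmemM c, pv_runs_mem_iff, pv_runs_mem_iff, List.mem_filter, PySem.Set.mem_ofList,
        Bool.and_eq_true, beq_iff_eq, beq_iff_eq]
    constructor
    · rintro ⟨⟨hm1, hc1⟩, ⟨hm2, hc2⟩⟩
      exact ⟨hm1, hc1, hc2⟩
    · rintro ⟨hm1, hc1, hc2⟩
      have hpos : 0 < t1.count c := List.count_pos_iff.mpr hm1
      have hm2 : c ∈ t2 := List.count_pos_iff.mp (by omega)
      exact ⟨⟨hm1, hc1⟩, ⟨hm2, hc2⟩⟩
  · exact hpairM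

theorem bothCountX_eq_alt (string1 string2 : String) (x : Int) :
    bothCountX string1 string2 x = bothCountX_alt string1 string2 x := by
  unfold bothCountX bothCountX_alt
  generalize (PySem.Str.lower string1).toList = t1
  generalize (PySem.Str.lower string2).toList = t2
  generalize hd1 : List.foldl (fun d c => d.insert c (d.getD c 0 + 1)) (PySem.Dict.empty : PySem.Dict Char Int) t1 = d1
  generalize hd2 : List.foldl (fun d c => d.insert c (d.getD c 0 + 1)) (PySem.Dict.empty : PySem.Dict Char Int) t2 = d2
  simp only [PySem.List.foldl_append_if_eq_filter, List.nil_append]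
  subst hd1 hd2
  simp only [PySem.Dict.foldl_insert_getD_add_one_eq_counter, PySem.Dict.keys_counter]
  rw [pv_filter_eq, pv_sorted_filter_eq_merge]

-- ===== VERDICT =====
theorem bothCountX_spec : Claim_equal_bothCountX := by
  intro s1 s2 x _
  exact bothCountX_eq_alt s1 s2 x
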